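-- pv_equiv track=rewrite | github.com/zhouqingzq/OpenFEP | segmentum/m47_strict_audit.py | _overall_conclusion
-- ===== SOURCE A (Python) =====
-- from typing import Any
--
-- def _overall_conclusion(gate_results: list[dict[str, Any]]) -> tuple[str, str]:
--     verdicts = [item["strict_verdict"] for item in gate_results]
--     if "FAIL" in verdicts:
--         return "FAIL", "Strict M4.7 acceptance failed."
--     if "BLOCKED" in verdicts:
--         return "BLOCKED", "Strict M4.7 acceptance remains blocked because G9 has not been completed with a live full regression run."
--     if "PARTIAL" in verdicts:
--         return "PARTIAL", "Core mechanisms exist, but multiple gates still rely on unresolved implementation shortcuts."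
--     return "PASS", "Strict M4.7 acceptance passed."
-- ===== SOURCE B (Python) =====
-- _RANK = {"FAIL": 0, "BLOCKED": 1, "PARTIAL": 2}
--
-- _TABLE = [
--     ("FAIL", "Strict M4.7 acceptance failed."),
--     ("BLOCKED", "Strict M4.7 acceptance remains blocked because G9 has not been completed with a live full regression run."),
--     ("PARTIAL", "Core mechanisms exist, but multiple gates still rely on unresolved implementation shortcuts."),
--     ("PASS", "Strict M4.7 acceptance passed."),
-- ]
--
-- def _overall_conclusion(gate_results):
--     best = 3
--     for item in gate_results:
--         best = min(best, _RANK.get(item["strict_verdict"], 3))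
--     return _TABLE[best]
-- ===== Notes on version B (the rewrite author's own statement) =====
-- stated objective: alternative
-- what changed: Replaces the three sequential membership scans over a materialized verdict list with a single pass tracking the minimum severity rank, followed by a lookup in a priority-ordered (code, message) table.
import Mathlib
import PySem

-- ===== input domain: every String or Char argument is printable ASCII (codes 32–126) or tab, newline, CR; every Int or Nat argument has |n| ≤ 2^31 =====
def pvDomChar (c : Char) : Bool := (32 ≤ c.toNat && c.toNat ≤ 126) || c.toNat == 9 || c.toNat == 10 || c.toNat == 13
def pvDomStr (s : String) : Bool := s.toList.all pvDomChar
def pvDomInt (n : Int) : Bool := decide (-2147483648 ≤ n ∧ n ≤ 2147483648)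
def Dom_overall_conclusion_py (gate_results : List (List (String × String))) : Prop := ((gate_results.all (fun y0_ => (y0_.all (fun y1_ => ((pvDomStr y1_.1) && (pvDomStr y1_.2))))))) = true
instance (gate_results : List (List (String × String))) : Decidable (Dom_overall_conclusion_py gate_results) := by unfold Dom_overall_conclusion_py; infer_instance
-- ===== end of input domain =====

-- B replaces A's three sequential membership scans with one min-severity pass plus a table lookup (objective: alternative decomposition, same cost).
-- Both programs only read the "strict_verdict" entry of each dict; the equivalence is about the return value (neither mutates).

-- ===== PORT A =====
-- item["strict_verdict"] : first-match dict lookup (the dicts arrive as association lists)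
def pvSV (d : List (String × String)) : Option String := (PySem.Dict.mk d).get? "strict_verdict"

def overall_conclusion_py (gate_results : List (List (String × String))) : String × String :=
  let verdicts := gate_results.map pvSV
  if some "FAIL" ∈ verdicts then ("FAIL", "Strict M4.7 acceptance failed.")
  else if some "BLOCKED" ∈ verdicts then ("BLOCKED", "Strict M4.7 acceptance remains blocked because G9 has not been completed with a live full regression run.")
  else if some "PARTIAL" ∈ verdicts then ("PARTIAL", "Core mechanisms exist, but multiple gates still rely on unresolved implementation shortcuts.")
  else ("PASS", "Strict M4.7 acceptance passed.")

-- ===== PORT B =====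
-- _RANK.get(v, 3) on the looked-up value
def pvRank (o : Option String) : Nat :=
  if o = some "FAIL" then 0 else if o = some "BLOCKED" then 1 else if o = some "PARTIAL" then 2 else 3

-- _TABLE
def pvTable : List (String × String) :=
  [("FAIL", "Strict M4.7 acceptance failed."),
   ("BLOCKED", "Strict M4.7 acceptance remains blocked because G9 has not been completed with a live full regression run."),
   ("PARTIAL", "Core mechanisms exist, but multiple gates still rely on unresolved implementation shortcuts."),
   ("PASS", "Strict M4.7 acceptance passed.")]

def overall_conclusion_py_alt (gate_results : List (List (String × String))) : String × String :=
  let best := gate_results.foldl (fun b d => min b (pvRank (pvSV d))) 3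
  pvTable.getD best ("PASS", "Strict M4.7 acceptance passed.")

-- ===== PRECONDITION & SPEC =====
-- Pre_ excludes items lacking the "strict_verdict" key, on which Python A raises KeyError.
def Pre_overall_conclusion_py (gate_results : List (List (String × String))) : Prop :=
  ∀ d ∈ gate_results, "strict_verdict" ∈ d.map Prod.fst
instance (gate_results : List (List (String × String))) : Decidable (Pre_overall_conclusion_py gate_results) := by unfold Pre_overall_conclusion_py; infer_instance
def pvWitness_overall_conclusion_py : (List (List (String × String))) :=
  [[("strict_verdict", "PASS")], [("strict_verdict", "PARTIAL")]]

def Spec_overall_conclusion_py (gate_results : List (List (String × String))) (out : String × String) : Prop := out = overall_conclusion_py_alt gate_results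
instance (gate_results : List (List (String × String))) (out : String × String) : Decidable (Spec_overall_conclusion_py gate_results out) := by unfold Spec_overall_conclusion_py; infer_instance

-- ===== CLAIM (what is proved, stated in full; the proofs are below) =====
def Claim_equal_overall_conclusion_py : Prop := ∀ (gate_results : List (List (String × String))), Dom_overall_conclusion_py gate_results → Pre_overall_conclusion_py gate_results → Spec_overall_conclusion_py gate_results (overall_conclusion_py gate_results)

-- ===== LEMMAS AND PROOFS =====

-- the min-fold computes the rank of the most severe verdict present
theorem pv_fold_char (gs : List (List (String × String))) (a : Nat) (ha : a ≤ 3) :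
    gs.foldl (fun b d => min b (pvRank (pvSV d))) a
      = min a (if some "FAIL" ∈ gs.map pvSV then 0
               else if some "BLOCKED" ∈ gs.map pvSV then 1
               else if some "PARTIAL" ∈ gs.map pvSV then 2 else 3) := by
  induction gs generalizing a with
  | nil => simp; omega
  | cons d t ih =>
    have h := ih (min a (pvRank (pvSV d))) (by unfold pvRank; split_ifs <;> omega)
    simp only [List.foldl_cons, List.map_cons, List.mem_cons] at *
    rw [h]
    by_cases h0 : pvSV d = some "FAIL" <;>
    by_cases h1 : pvSV d = some "BLOCKED" <;>
    by_cases h2 : pvSV d = some "PARTIAL" <;>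
    by_cases m0 : some "FAIL" ∈ t.map pvSV <;>
    by_cases m1 : some "BLOCKED" ∈ t.map pvSV <;>
    by_cases m2 : some "PARTIAL" ∈ t.map pvSV <;>
      simp [pvRank, h0, h1, h2, m0, m1, m2, eq_comm]

theorem pv_equal : ∀ (gs : List (List (String × String))),
    overall_conclusion_py gs = overall_conclusion_py_alt gs := by
  intro gs
  unfold overall_conclusion_py overall_conclusion_py_alt
  rw [pv_fold_char gs 3 (le_refl 3)]
  by_cases h0 : some "FAIL" ∈ gs.map pvSV <;>
  by_cases h1 : some "BLOCKED" ∈ gs.map pvSV <;>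
  by_cases h2 : some "PARTIAL" ∈ gs.map pvSV <;>
    simp [h0, h1, h2, pvTable]

-- ===== VERDICT (by name: the statement is the Claim_ definition above) =====
theorem overall_conclusion_py_spec : Claim_equal_overall_conclusion_py := by
  intro gs _ _
  unfold Spec_overall_conclusion_py
  exact pv_equal gs
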